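-- pv_equiv track=rewrite | github.com/marwabaker/Thesis | Thesis/src/app.py | _build_timeslots
-- ===== SOURCE A (Python) =====
-- from typing import Dict, Iterable, List, Optional, Sequence, Set, Tuple
--
-- def _build_timeslots(count: int) -> List[Tuple[str, str]]:
--     days = ["Monday", "Tuesday", "Wednesday", "Thursday", "Friday", "Saturday", "Sunday"]
--     hours = list(range(8, 22))
--     slots: List[Tuple[str, str]] = []
--     index = 0
--     while len(slots) < count:
--         day = days[index % len(days)]
--         hour = hours[(index // len(days)) % len(hours)]
--         slots.append((day, f"{hour:02d}:00"))
--         index += 1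
--     return slots
-- ===== SOURCE B (Python) =====
-- from typing import List, Tuple
--
-- def _build_timeslots(count: int) -> List[Tuple[str, str]]:
--     days = ["Monday", "Tuesday", "Wednesday", "Thursday", "Friday", "Saturday", "Sunday"]
--     n = max(count, 0)
--     # column of days: the 7-day week repeated, truncated to n
--     day_col = (days * (n // 7 + 1))[:n]
--     # column of hours: each hour label held for 7 slots (one week), the 98-slot period repeated
--     hour_col = [f"{h:02d}:00" for h in range(8, 22) for _ in range(7)] * (n // 98 + 1)
--     return list(zip(day_col, hour_col[:n]))
-- ===== Notes on version B (the rewrite author's own statement) =====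
-- stated objective: alternative
-- what changed: B builds the result column-wise: the day column (week repeated) and the hour column (each hour label held for 7 slots, period repeated) are constructed as two independent lists and zipped, instead of A's while loop computing day and hour by modular arithmetic per element. (bulk list repetition and zip replace per-element Python-level arithmetic, a constant-factor win).
import Mathlib
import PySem

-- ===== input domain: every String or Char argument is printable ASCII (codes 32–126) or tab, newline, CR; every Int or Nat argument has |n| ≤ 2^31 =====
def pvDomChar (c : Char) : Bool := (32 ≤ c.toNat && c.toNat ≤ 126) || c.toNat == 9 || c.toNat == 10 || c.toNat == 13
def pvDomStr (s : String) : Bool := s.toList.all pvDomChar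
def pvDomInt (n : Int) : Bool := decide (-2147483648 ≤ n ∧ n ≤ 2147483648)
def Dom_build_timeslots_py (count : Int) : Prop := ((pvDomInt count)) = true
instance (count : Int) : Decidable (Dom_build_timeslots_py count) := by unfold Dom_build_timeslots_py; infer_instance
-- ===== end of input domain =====

-- B builds the day column and the hour column as two independent repeated lists and zips them, instead of A's per-element modular arithmetic (alternative decomposition, similar cost).


-- ===== PORT A =====
def pvDays : List String := ["Monday", "Tuesday", "Wednesday", "Thursday", "Friday", "Saturday", "Sunday"]

def pvHours : List Int := PySem.List.pyRange 8 22 1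

-- f"{hour:02d}:00": exact zero-padding for 0 ≤ hour ≤ 99 (hours here are 8..21)
def pvFmt (h : Int) : String := (if h < 10 then "0" ++ PySem.Int.toStr h else PySem.Int.toStr h) ++ ":00"

-- the while loop of A; fuel = count.toNat bounds the iterations (len(slots) grows by 1 per step from 0)
def pvALoop (count : Int) : Nat → Int → List (String × String) → List (String × String)
  | 0, _, slots => slots
  | fuel + 1, index, slots =>
      if (slots.length : Int) < count then
        pvALoop count fuel (index + 1)
          (slots ++ [(PySem.List.pyGetD pvDays (PySem.Int.mod index 7) "",
                      pvFmt (PySem.List.pyGetD pvHours (PySem.Int.mod (PySem.Int.floordiv index 7) 14) 0))])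
      else slots

def build_timeslots_py (count : Int) : List (String × String) :=
  pvALoop count count.toNat 0 []

-- ===== PORT B =====
-- hour column period: [f"{h:02d}:00" for h in range(8, 22) for _ in range(7)]
def pvHourCol : List String := pvHours.flatMap (fun h => List.replicate 7 (pvFmt h))

def build_timeslots_py_alt (count : Int) : List (String × String) :=
  let n := (max count 0).toNat
  let dayCol := ((List.replicate (n / 7 + 1) pvDays).flatten).take n
  let hourCol := (List.replicate (n / 98 + 1) pvHourCol).flatten
  dayCol.zip (hourCol.take n)

-- ===== PRECONDITION & SPEC =====
def Spec_build_timeslots_py (count : Int) (out : List (String × String)) : Prop := out = build_timeslots_py_alt count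
instance (count : Int) (out : List (String × String)) : Decidable (Spec_build_timeslots_py count out) := by unfold Spec_build_timeslots_py; infer_instance

-- ===== CLAIM (what is proved, stated in full; the proofs are below) =====
def Claim_equal_build_timeslots_py : Prop := ∀ (count : Int), Dom_build_timeslots_py count → Spec_build_timeslots_py count (build_timeslots_py count)

-- ===== LEMMAS AND PROOFS =====

-- the two columns of the i-th slot, as functions of the index
def pvDaySlot (i : Nat) : String := pvDays.getD (i % 7) ""
def pvHourSlot (i : Nat) : String := pvFmt (pvHours.getD ((i / 7) % 14) 0)
def pvSlot (i : Nat) : String × String := (pvDaySlot i, pvHourSlot i)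

theorem pvDays_eq : pvDays = (List.range 7).map pvDaySlot := by decide

theorem pvHourCol_eq : pvHourCol = (List.range 98).map pvHourSlot := by decide

theorem pvDaySlot_period (i : Nat) : pvDaySlot (7 + i) = pvDaySlot i := by
  unfold pvDaySlot; congr 1; omega

theorem pvHourSlot_period (i : Nat) : pvHourSlot (98 + i) = pvHourSlot i := by
  unfold pvHourSlot
  have h : ((98 + i) / 7) % 14 = (i / 7) % 14 := by omega
  rw [h]

theorem pvFlatten_replicate {α : Type} (p : Nat) (f : Nat → α) (period : List α)
    (hper : period = (List.range p).map f) (hf : ∀ i, f (p + i) = f i) (k : Nat) :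
    (List.replicate k period).flatten = (List.range (p * k)).map f := by
  induction k with
  | zero => simp
  | succ k ih =>
      have hpk : p * (k + 1) = p + p * k := by ring
      rw [List.replicate_succ, List.flatten_cons, ih, hpk, List.range_add, List.map_append,
        List.map_map, hper]
      congr 1
      exact List.map_congr_left (fun j _ => (hf j).symm)

theorem pvCol_take {α : Type} (p : Nat) (f : Nat → α) (period : List α)
    (hper : period = (List.range p).map f) (hf : ∀ i, f (p + i) = f i)
    (k n : Nat) (hn : n ≤ p * k) :
    ((List.replicate k period).flatten).take n = (List.range n).map f := by
  rw [pvFlatten_replicate p f period hper hf k, ← List.map_take, List.take_range,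
    show min n (p * k) = n by omega]

theorem pvALoop_eq (count : Int) (hc : 0 < count) :
    ∀ (fuel j : Nat), j + fuel = count.toNat →
      pvALoop count fuel (j : Int) ((List.range j).map pvSlot) =
        (List.range count.toNat).map pvSlot := by
  intro fuel
  induction fuel with
  | zero => intro j hj; simp [pvALoop]; rw [show j = count.toNat by omega]
  | succ fuel ih =>
      intro j hj
      have hjlt : (j : Int) < count := by omega
      have hcond : (((List.range j).map pvSlot).length : Int) < count := by
        simpa using hjlt
      rw [pvALoop, if_pos hcond]
      have hmod : PySem.Int.mod (j : Int) 7 = ((j % 7 : Nat) : Int) := by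
        rw [PySem.Int.mod_eq_emod_of_pos (by omega)]; omega
      have hdiv : PySem.Int.floordiv (j : Int) 7 = ((j / 7 : Nat) : Int) := by
        rw [PySem.Int.floordiv_eq_ediv_of_pos (by omega)]; omega
      have hmod2 : PySem.Int.mod ((j / 7 : Nat) : Int) 14 = (((j / 7) % 14 : Nat) : Int) := by
        rw [PySem.Int.mod_eq_emod_of_pos (by omega)]; omega
      rw [hmod, hdiv, hmod2, PySem.List.pyGetD_natCast, PySem.List.pyGetD_natCast]
      have hstep : (List.range j).map pvSlot ++ [pvSlot j] = (List.range (j + 1)).map pvSlot := by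
        rw [List.range_succ, List.map_append]; rfl
      have hidx : (j : Int) + 1 = ((j + 1 : Nat) : Int) := by push_cast; ring
      rw [show ((pvDays.getD (j % 7) "", pvFmt (pvHours.getD (j / 7 % 14) 0))) = pvSlot j from rfl,
        hstep, hidx]
      exact ih (j + 1) (by omega)

-- ===== VERDICT (by name: the statement is the Claim_ definition above) =====
theorem build_timeslots_py_spec : Claim_equal_build_timeslots_py := by
  intro count _
  unfold Spec_build_timeslots_py build_timeslots_py build_timeslots_py_alt
  set n := (max count 0).toNat with hn
  have hn' : n = count.toNat := by omega
  have hday : ((List.replicate (n / 7 + 1) pvDays).flatten).take n =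
      (List.range n).map pvDaySlot :=
    pvCol_take 7 pvDaySlot pvDays pvDays_eq pvDaySlot_period _ n (by omega)
  have hhour : ((List.replicate (n / 98 + 1) pvHourCol).flatten).take n =
      (List.range n).map pvHourSlot :=
    pvCol_take 98 pvHourSlot pvHourCol pvHourCol_eq pvHourSlot_period _ n (by omega)
  simp only [hday, hhour, List.zip_map']
  by_cases hc : count ≤ 0
  · rw [show count.toNat = 0 by omega, show n = 0 by omega]; rfl
  · rw [not_le] at hc
    have hA : pvALoop count count.toNat 0 [] = (List.range count.toNat).map pvSlot := by
      have := pvALoop_eq count hc count.toNat 0 (by omega)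
      simpa using this
    rw [hA, hn']; rfl
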